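-- pv_equiv track=rewrite | github.com/JFF-Bohdan/sim-module | lib/sim900/smshandler.py | __encodePhoneNumber
-- ===== SOURCE A (Python) =====
-- def __encodePhoneNumber(number):
--     """
--     Encodes phone number according to PDU rules
--
--     :param number: phone number for encoding
--     :return: encoded phone number
--     """
--
--     num = str(number).strip()
--     num = num.replace("+", "")
--
--     #adding pad byte
--     if (len(num) % 2) != 0:
--         num += 'F'
--
--     #calculating reverted result, according to the
--     result = ""
--     i = 0
--     while i < len(num):
--         result += num[i+1] + num[i]
--         i += 2
--
--     return result
-- ===== SOURCE B (Python) =====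
-- def __encodePhoneNumber(number):
--     """Encodes phone number according to PDU rules."""
--     num = str(number).strip().replace("+", "")
--     if len(num) % 2:
--         num += 'F'
--     # output position i reads the source character at i + 1 - 2*(i % 2):
--     # a single index-permutation pass instead of pairwise concatenation
--     return ''.join(num[i + 1 - 2 * (i % 2)] for i in range(len(num)))
-- ===== Notes on version B (the rewrite author's own statement) =====
-- stated objective: faster
-- what changed: Replaces the pairwise index-stepping while loop that builds the result by repeated string concatenation of num[i+1]+num[i] with a single index-permutation pass: output position i reads source position i + 1 - 2*(i % 2), joined once by str.join; no pair structure is formed.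
import Mathlib
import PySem

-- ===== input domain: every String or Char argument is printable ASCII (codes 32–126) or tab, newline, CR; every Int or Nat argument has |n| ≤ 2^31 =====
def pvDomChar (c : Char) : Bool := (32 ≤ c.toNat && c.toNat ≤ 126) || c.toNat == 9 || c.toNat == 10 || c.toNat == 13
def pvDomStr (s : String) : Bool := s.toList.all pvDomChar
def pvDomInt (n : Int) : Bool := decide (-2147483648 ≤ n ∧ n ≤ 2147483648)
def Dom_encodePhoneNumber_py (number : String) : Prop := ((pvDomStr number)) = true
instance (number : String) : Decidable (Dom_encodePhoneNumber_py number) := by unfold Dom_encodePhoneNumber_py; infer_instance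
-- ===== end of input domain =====

-- B replaces A's pairwise index-stepping concatenation loop by a single index-permutation
-- pass: output position i reads source position i + 1 - 2*(i % 2), joined once; objective: faster
-- (a timing run measured B faster; A concatenates strings repeatedly).

-- ===== PORT A =====
-- the while loop: result += num[i+1] + num[i]; i += 2   (after padding the length is even,
-- so both indices are always in range and pyGet? never returns none; getD default is unreachable)
def encodeLoopA (num : List Char) (i : Nat) (result : List Char) : List Char :=
  if i < num.length then
    encodeLoopA num (i + 2)
      (result ++ [(PySem.List.pyGet? num ((i : Int) + 1)).getD default,
                  (PySem.List.pyGet? num (i : Int)).getD default])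
  else result
termination_by num.length - i

def encodePhoneNumber_py (number : String) : String :=
  -- the string is handled as its list of code points (the PySem convention)
  let num := (PySem.Str.replace (PySem.Str.strip number) "+" "").toList
  let num := if num.length % 2 ≠ 0 then num ++ ['F'] else num
  String.mk (encodeLoopA num 0 [])

-- ===== PORT B =====
-- ''.join(num[i + 1 - 2 * (i % 2)] for i in range(len(num))): one map over the range of
-- output positions; PySem.Int.mod is Python's %, pyGet? never returns none here (the
-- permuted index stays in range because the padded length is even)
def encodePhoneNumber_py_alt (number : String) : String :=
  let num := (PySem.Str.replace (PySem.Str.strip number) "+" "").toList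
  let num := if num.length % 2 ≠ 0 then num ++ ['F'] else num
  String.mk ((PySem.List.pyRange 0 (num.length : Int) 1).map
    (fun i => (PySem.List.pyGet? num (i + 1 - 2 * PySem.Int.mod i 2)).getD default))

-- ===== PRECONDITION & SPEC =====
def Spec_encodePhoneNumber_py (number : String) (out : String) : Prop := out = encodePhoneNumber_py_alt number
instance (number : String) (out : String) : Decidable (Spec_encodePhoneNumber_py number out) := by unfold Spec_encodePhoneNumber_py; infer_instance

-- ===== CLAIM (what is proved, stated in full; the proofs are below) =====
def Claim_equal_encodePhoneNumber_py : Prop := ∀ (number : String), Dom_encodePhoneNumber_py number → Spec_encodePhoneNumber_py number (encodePhoneNumber_py number)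

-- ===== LEMMAS AND PROOFS =====

-- common reference form: the padded string chunked into pairs, each pair emitted swapped
def pairsOf : List Char → List (Char × Char)
  | a :: b :: t => (a, b) :: pairsOf t
  | _ => []

lemma encodeLoopA_eq (l : List Char) :
    ∀ (m i : Nat) (acc : List Char), l.length - i = 2 * m →
      encodeLoopA l i acc = acc ++ (pairsOf (l.drop i)).flatMap (fun p => [p.2, p.1]) := by
  intro m
  induction m with
  | zero =>
    intro i acc h
    have hi : l.length ≤ i := by omega
    rw [encodeLoopA]
    simp [Nat.not_lt.mpr hi, List.drop_eq_nil_of_le hi, pairsOf]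
  | succ m ih =>
    intro i acc h
    have hi1 : i + 1 < l.length := by omega
    have hi : i < l.length := by omega
    rw [encodeLoopA]
    simp only [hi, if_true]
    rw [ih (i + 2) _ (by omega)]
    have hdrop : l.drop i = l[i] :: l[i+1] :: l.drop (i + 2) := by
      rw [List.drop_eq_getElem_cons hi, List.drop_eq_getElem_cons hi1]
    have g1 : PySem.List.pyGet? l (i : Int) = some l[i] := by
      simp [PySem.List.pyGet?_natCast, List.getElem?_eq_getElem hi]
    have g2 : PySem.List.pyGet? l ((i : Int) + 1) = some l[i+1] := by
      have hcast : ((i : Int) + 1) = ((i + 1 : Nat) : Int) := by push_cast; ring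
      rw [hcast, PySem.List.pyGet?_natCast, List.getElem?_eq_getElem hi1]
    rw [g1, g2, hdrop]
    simp [pairsOf]

-- the permuted index written over Nat
def permIdx (k : Nat) : Nat := if k % 2 = 0 then k + 1 else k - 1

lemma permIdx_int (k : Nat) :
    ((k : Int) + 1 - 2 * PySem.Int.mod (k : Int) 2) = ((permIdx k : Nat) : Int) := by
  unfold permIdx
  have hmod : PySem.Int.mod (k : Int) 2 = ((k % 2 : Nat) : Int) := by
    simp [PySem.Int.mod, Int.fmod_eq_emod]
  rw [hmod]
  rcases Nat.even_or_odd k with h | h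
  · have h0 : k % 2 = 0 := Nat.even_iff.mp h
    simp [h0]
  · have h1 : k % 2 = 1 := Nat.odd_iff.mp h
    have hk : 1 ≤ k := by omega
    simp [h1]
    omega

lemma mapPerm_eq (m : Nat) : ∀ (l : List Char), l.length = 2 * m →
    (List.range l.length).map
      (fun k => (PySem.List.pyGet? l (((permIdx k : Nat) : Int))).getD default)
      = (pairsOf l).flatMap (fun p => [p.2, p.1]) := by
  induction m with
  | zero =>
    intro l h
    have : l = [] := List.length_eq_zero_iff.mp (by omega)
    subst this; simp [pairsOf]
  | succ m ih =>
    intro l h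
    match l, h with
    | a :: b :: t, h =>
      have ht : t.length = 2 * m := by simp at h; omega
      have hlen : (a :: b :: t).length = t.length + 2 := by simp
      rw [hlen]
      have hr : List.range (t.length + 2)
          = 0 :: 1 :: (List.range t.length).map (fun k => k + 2) := by
        rw [List.range_succ_eq_map, List.range_succ_eq_map]
        simp only [List.map_cons, List.map_map]
        refine congrArg _ (congrArg _ ?_)
        apply List.map_congr_left; intro k _
        simp [Function.comp, Nat.succ_eq_add_one]
      rw [hr]
      simp only [List.map_cons, List.map_map, Function.comp_def]
      have f0 : (PySem.List.pyGet? (a :: b :: t) (((permIdx 0 : Nat) : Int))).getD default = b := by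
        simp [permIdx]
      have f1 : (PySem.List.pyGet? (a :: b :: t) (((permIdx 1 : Nat) : Int))).getD default = a := by
        simp [permIdx]
      have fshift : ∀ k : Nat,
          (PySem.List.pyGet? (a :: b :: t) (((permIdx (k + 2) : Nat) : Int))).getD default
            = (PySem.List.pyGet? t (((permIdx k : Nat) : Int))).getD default := by
        intro k
        have hp : permIdx (k + 2) = permIdx k + 2 := by
          unfold permIdx
          rcases Nat.even_or_odd k with hk | hk
          · have h0 : k % 2 = 0 := Nat.even_iff.mp hk
            simp [h0]
          · have h1 : k % 2 = 1 := Nat.odd_iff.mp hk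
            have : (k + 2) % 2 = 1 := by omega
            simp [h1, this]
            omega
        rw [hp, PySem.List.pyGet?_natCast]
        simp
      rw [f0, f1]
      simp only [fshift]
      rw [ih t ht]
      simp [pairsOf]

-- ===== VERDICT (by name: the statement is the Claim_ definition above) =====
theorem encodePhoneNumber_py_spec : Claim_equal_encodePhoneNumber_py := by
  intro number _
  unfold Spec_encodePhoneNumber_py encodePhoneNumber_py encodePhoneNumber_py_alt
  dsimp only
  set num := (PySem.Str.replace (PySem.Str.strip number) "+" "").toList with hnum
  set padded := if num.length % 2 ≠ 0 then num ++ ['F'] else num with hpad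
  have heven : padded.length % 2 = 0 := by
    rw [hpad]; split_ifs with hodd
    · simp only [List.length_append, List.length_cons, List.length_nil]; omega
    · omega
  obtain ⟨m, hm⟩ := (Nat.even_iff.mpr heven)
  rw [encodeLoopA_eq padded m 0 [] (by omega)]
  rw [PySem.List.pyRange_one]
  have hcast : ((padded.length : Int) - 0).toNat = padded.length := by omega
  rw [hcast]
  refine congrArg String.mk ?_
  simp only [List.drop_zero, List.nil_append]
  rw [← mapPerm_eq m padded (by omega)]
  simp only [List.map_map, Function.comp_def]
  apply List.map_congr_left
  intro k _
  rw [show (0 : Int) + (k : Int) = (k : Int) by ring, permIdx_int k]
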